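-- pv_equiv track=rewrite | github.com/GShevchenko/28_task | task_9/task_9_crude.py | make_decode
-- ===== SOURCE A (Python) =====
-- def make_decode(encoded_str: str) -> str:
--     result: str = ''
--     encoded_arr: list[str] = encoded_str.split(" ")
--     for i in range(len(encoded_arr[0])):
--         for j in range(len(encoded_arr)):
--             try:
--                 result += encoded_arr[j][i]
--             except:
--                 continue
--         result += " "
--     return result.strip()
-- ===== SOURCE B (Python) =====
-- def make_decode(encoded_str: str) -> str:
--     encoded_arr = encoded_str.split(" ")
--     cols = [''] * len(encoded_arr[0])
--     for row in encoded_arr: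
--         cols = [col + row[i:i + 1] for i, col in enumerate(cols)]
--     return ' '.join(cols).strip()
-- ===== Notes on version B (the rewrite author's own statement) =====
-- stated objective: alternative
-- what changed: B builds the output row-major in a single pass over the tokens, keeping one string buffer per column (column count fixed by the first token) and joining the buffers at the end, instead of A's column-major nested loops that re-index every token once per column inside a try/except.
import Mathlib
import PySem

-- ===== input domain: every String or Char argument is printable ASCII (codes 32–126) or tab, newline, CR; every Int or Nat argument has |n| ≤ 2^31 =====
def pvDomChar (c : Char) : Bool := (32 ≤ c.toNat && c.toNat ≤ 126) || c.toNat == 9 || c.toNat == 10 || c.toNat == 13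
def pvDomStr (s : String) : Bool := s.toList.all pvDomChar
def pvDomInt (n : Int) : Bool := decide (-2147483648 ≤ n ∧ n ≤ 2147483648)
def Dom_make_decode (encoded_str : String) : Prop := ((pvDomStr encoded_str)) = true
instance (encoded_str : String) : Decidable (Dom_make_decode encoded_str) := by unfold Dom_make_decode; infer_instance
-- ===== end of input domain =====

-- B rebuilds the output row-major with per-column buffers in a single pass over the tokens
-- (instead of A's column-major re-indexing of every token once per column); objective: alternative.

-- ===== PORT A =====
def make_decode (encoded_str : String) : String :=
  let encoded_arr : List (List Char) := PySem.Chars.splitOn encoded_str.toList [' ']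
  let result : List Char :=
    (PySem.List.pyRange 0 (PySem.List.len (PySem.List.pyGetD encoded_arr 0 []))).foldl
      (fun result i =>
        ((PySem.List.pyRange 0 (PySem.List.len encoded_arr)).foldl
          (fun result j =>
            -- try: result += encoded_arr[j][i]  except: continue
            match PySem.List.pyGet? (PySem.List.pyGetD encoded_arr j []) i with
            | some c => result ++ [c]
            | none => result) result) ++ [' ']) []
  String.ofList (PySem.Chars.strip result)

-- ===== PORT B =====
def make_decode_alt (encoded_str : String) : String :=
  let encoded_arr : List (List Char) := PySem.Chars.splitOn encoded_str.toList [' ']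
  let cols0 : List (List Char) := List.replicate (PySem.List.pyGetD encoded_arr 0 []).length []
  let cols : List (List Char) := encoded_arr.foldl
    (fun cols row =>
      (PySem.List.enumerate cols).map
        (fun p => p.2 ++ PySem.Chars.slice row (some p.1) (some (p.1 + 1)))) cols0
  String.ofList (PySem.Chars.strip (PySem.Chars.join [' '] cols))

-- ===== PRECONDITION & SPEC =====
def Spec_make_decode (encoded_str : String) (out : String) : Prop := out = make_decode_alt encoded_str
instance (encoded_str : String) (out : String) : Decidable (Spec_make_decode encoded_str out) := by unfold Spec_make_decode; infer_instance

-- ===== CLAIM (what is proved, stated in full; the proofs are below) =====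
def Claim_equal_make_decode : Prop := ∀ (encoded_str : String), Dom_make_decode encoded_str → Spec_make_decode encoded_str (make_decode encoded_str)

-- ===== LEMMAS AND PROOFS =====

-- one character of a row, as the slice row[i:i+1] B uses
def pvPick (i : Int) (row : List Char) : List Char :=
  PySem.Chars.slice row (some i) (some (i + 1))

-- the i-th output column: the i-th character of every token that has one, in token order
def pvCol (arr : List (List Char)) (i : Int) : List Char :=
  arr.flatMap (pvPick i)

lemma take_one_drop {α : Type} (xs : List α) (k : Nat) :
    List.take 1 (List.drop k xs) = match xs[k]? with | some c => [c] | none => [] := by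
  induction xs generalizing k with
  | nil => simp
  | cons x xs ih =>
    cases k with
    | zero => simp
    | succ k => simpa using ih k

lemma pick_eq (row : List Char) (i : Int) (hi : 0 ≤ i) :
    (match PySem.List.pyGet? row i with
     | some c => [c]
     | none => ([] : List Char)) = pvPick i row := by
  unfold pvPick
  simp only [PySem.Chars.slice_eq_listSlice]
  rw [PySem.List.slice_toNat row hi (by omega)]
  have hk : (i + 1).toNat - i.toNat = 1 := by omega
  rw [hk, take_one_drop]
  obtain ⟨k, rfl⟩ := Int.eq_ofNat_of_zero_le hi
  simp only [Int.toNat_natCast]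
  rw [PySem.List.pyGet?_natCast]
  cases row[k]? <;> rfl

lemma inner_eq (arr : List (List Char)) (i : Int) (hi : 0 ≤ i) (res : List Char) :
    (PySem.List.pyRange 0 (PySem.List.len arr)).foldl
      (fun result j =>
        match PySem.List.pyGet? (PySem.List.pyGetD arr j []) i with
        | some c => result ++ [c]
        | none => result) res
    = res ++ pvCol arr i := by
  have h := PySem.List.foldl_pyRange_zero_pyGetD' arr []
    (fun result row =>
      match PySem.List.pyGet? row i with
      | some c => result ++ [c]
      | none => result) res
  simp only [PySem.List.len] at h ⊢
  rw [h]
  have hbody : (fun (result : List Char) (row : List Char) =>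
      match PySem.List.pyGet? row i with
      | some c => result ++ [c]
      | none => result)
      = fun result row => result ++ pvPick i row := by
    funext result row
    rw [← pick_eq row i hi]
    cases PySem.List.pyGet? row i <;> simp
  rw [hbody, PySem.List.foldl_append_eq_flatMap]
  rfl

-- B's row loop keeps cols = the columns of the tokens processed so far
lemma fold_inv (arr : List (List Char)) (n : Nat) (g : Int → List Char) :
    arr.foldl
      (fun cols row =>
        (PySem.List.enumerate cols).map
          (fun p => p.2 ++ PySem.Chars.slice row (some p.1) (some (p.1 + 1))))
      ((PySem.List.pyRange 0 (n : Int)).map g)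
    = (PySem.List.pyRange 0 (n : Int)).map (fun i => g i ++ pvCol arr i) := by
  induction arr generalizing g with
  | nil =>
    simp [pvCol]
  | cons row arr ih =>
    simp only [List.foldl_cons]
    have hstep : (PySem.List.enumerate ((PySem.List.pyRange 0 (n : Int)).map g)).map
        (fun p => p.2 ++ PySem.Chars.slice row (some p.1) (some (p.1 + 1)))
        = (PySem.List.pyRange 0 (n : Int)).map (fun i => g i ++ pvPick i row) := by
      rw [PySem.List.enumerate_eq_map_pyRange ((PySem.List.pyRange 0 (n : Int)).map g) []]
      have hlen : PySem.List.len ((PySem.List.pyRange 0 (n : Int)).map g) = (n : Int) := by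
        simp [PySem.List.len, PySem.List.length_pyRange_one]
      rw [hlen, List.map_map]
      apply List.map_congr_left
      intro j hj
      rw [PySem.List.mem_pyRange_one] at hj
      simp only [Function.comp_apply]
      rw [PySem.List.pyGetD_map_pyRange_of_nonneg g (n : Int) j [] hj.1 hj.2]
      rfl
    rw [hstep, ih]
    apply List.map_congr_left
    intro i _
    simp [pvCol, List.append_assoc]

lemma flatMap_space_eq_join (parts : List (List Char)) (hne : parts ≠ []) :
    parts.flatMap (fun x => x ++ [' ']) = PySem.Chars.join [' '] parts ++ [' '] := by
  induction parts with
  | nil => exact absurd rfl hne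
  | cons p rest ih =>
    cases rest with
    | nil => simp [PySem.Chars.join_singleton]
    | cons q t =>
      rw [PySem.Chars.join_cons_cons]
      simp only [List.flatMap_cons] at ih ⊢
      rw [ih (by simp)]
      simp [List.append_assoc]

lemma lstrip_append (l m : List Char) :
    PySem.Chars.lstrip (l ++ m)
      = if PySem.Chars.lstrip l = [] then PySem.Chars.lstrip m
        else PySem.Chars.lstrip l ++ m := by
  induction l with
  | nil => simp [PySem.Chars.lstrip]
  | cons c l ih =>
    by_cases hc : PySem.Chars.isspace c = true
    · simpa [PySem.Chars.lstrip, hc] using ih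
    · simp [PySem.Chars.lstrip, hc]

lemma rstrip_append_space (l : List Char) :
    PySem.Chars.rstrip (l ++ [' ']) = PySem.Chars.rstrip l := by
  simp [PySem.Chars.rstrip, show PySem.Chars.isspace ' ' = true from by decide]

lemma strip_append_space (l : List Char) :
    PySem.Chars.strip (l ++ [' ']) = PySem.Chars.strip l := by
  unfold PySem.Chars.strip
  rw [lstrip_append]
  by_cases h : PySem.Chars.lstrip l = []
  · rw [if_pos h, h]
    have h1 : PySem.Chars.lstrip [' '] = [] := by decide
    rw [h1]
  · rw [if_neg h, rstrip_append_space]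

lemma main_eq (arr : List (List Char)) :
    String.ofList (PySem.Chars.strip
      ((PySem.List.pyRange 0 (PySem.List.len (PySem.List.pyGetD arr 0 []))).foldl
        (fun result i =>
          ((PySem.List.pyRange 0 (PySem.List.len arr)).foldl
            (fun result j =>
              match PySem.List.pyGet? (PySem.List.pyGetD arr j []) i with
              | some c => result ++ [c]
              | none => result) result) ++ [' ']) []))
    = String.ofList (PySem.Chars.strip (PySem.Chars.join [' ']
        (arr.foldl
          (fun cols row =>
            (PySem.List.enumerate cols).map
              (fun p => p.2 ++ PySem.Chars.slice row (some p.1) (some (p.1 + 1))))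
          (List.replicate (PySem.List.pyGetD arr 0 []).length [])))) := by
  have hn : PySem.List.len (PySem.List.pyGetD arr 0 [])
      = ((PySem.List.pyGetD arr 0 []).length : Int) := rfl
  rw [hn]
  generalize (PySem.List.pyGetD arr 0 []).length = n
  -- A's accumulated string before strip
  have hA : (PySem.List.pyRange 0 (n : Int)).foldl
      (fun result i =>
        ((PySem.List.pyRange 0 (PySem.List.len arr)).foldl
          (fun result j =>
            match PySem.List.pyGet? (PySem.List.pyGetD arr j []) i with
            | some c => result ++ [c]
            | none => result) result) ++ [' ']) []
      = (PySem.List.pyRange 0 (n : Int)).flatMap (fun i => pvCol arr i ++ [' ']) := by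
    rw [PySem.List.foldl_congr_mem _ _
      (fun result i => result ++ (pvCol arr i ++ [' '])) []
      (by
        intro acc i hi
        rw [PySem.List.mem_pyRange_one] at hi
        rw [inner_eq arr i hi.1 acc]
        simp [List.append_assoc])]
    rw [PySem.List.foldl_append_eq_flatMap]
    rfl
  -- B's cols are exactly the columns
  have hcols0 : List.replicate n ([] : List Char)
      = (PySem.List.pyRange 0 (n : Int)).map (fun _ => ([] : List Char)) := by
    rw [List.map_const', PySem.List.length_pyRange_one]
    simp
  have hB : arr.foldl
      (fun cols row =>
        (PySem.List.enumerate cols).map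
          (fun p => p.2 ++ PySem.Chars.slice row (some p.1) (some (p.1 + 1))))
      (List.replicate n ([] : List Char))
      = (PySem.List.pyRange 0 (n : Int)).map (fun i => pvCol arr i) := by
    rw [hcols0, fold_inv arr n (fun _ => [])]
    simp
  rw [hA, hB]
  rcases Nat.eq_zero_or_pos n with h0 | hpos
  · subst h0
    rw [show ((0 : Nat) : Int) = 0 from rfl,
      PySem.List.pyRange_one_eq_nil (le_refl (0 : Int))]
    simp [PySem.Chars.join_nil]
  · have hmapne : (PySem.List.pyRange 0 (n : Int)).map (fun i => pvCol arr i) ≠ [] := by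
      simp only [ne_eq, ← List.length_pos_iff, List.length_map,
        PySem.List.length_pyRange_one]
      omega
    have hfm : (PySem.List.pyRange 0 (n : Int)).flatMap (fun i => pvCol arr i ++ [' '])
        = ((PySem.List.pyRange 0 (n : Int)).map (fun i => pvCol arr i)).flatMap
            (fun x => x ++ [' ']) := by
      simp [List.flatMap_map]
    rw [hfm, flatMap_space_eq_join _ hmapne, strip_append_space]

-- ===== VERDICT (by name: the statement is the Claim_ definition above) =====
theorem make_decode_spec : Claim_equal_make_decode := by
  intro s _
  unfold Spec_make_decode make_decode make_decode_alt
  exact main_eq (PySem.Chars.splitOn s.toList [' '])
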